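-- pv_equiv track=rewrite | github.com/ami-dao/password-security-analyzer | password_analyzer.py | detect_character_sets
-- ===== SOURCE A (Python) =====
-- import string
--
-- def detect_character_sets(password: str) -> tuple:
--     """
--     Detect the character categories present in the password.
--     Returns booleans and an estimated character pool size.
--     """
--     has_lower = any(c.islower() for c in password)
--     has_upper = any(c.isupper() for c in password)
--     has_digit = any(c.isdigit() for c in password)
--     has_special = any(c in string.punctuation for c in password)
--     has_extended = any(ord(c) > 127 for c in password)
--
--     pool_size = 0
--     if has_lower:
--         pool_size += 26
--     if has_upper:
--         pool_size += 26
--     if has_digit: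
--         pool_size += 10
--     if has_special:
--         pool_size += len(string.punctuation)
--
--     return has_lower, has_upper, has_digit, has_special, has_extended, pool_size
-- ===== SOURCE B (Python) =====
-- import string
--
-- def detect_character_sets(password: str) -> tuple:
--     # One pass over the password maintaining five flags instead of five any() scans.
--     has_lower = has_upper = has_digit = has_special = has_extended = False
--     for c in password:
--         if c.islower():
--             has_lower = True
--         if c.isupper():
--             has_upper = True
--         if c.isdigit():
--             has_digit = True
--         if c in string.punctuation:
--             has_special = True
--         if ord(c) > 127:
--             has_extended = True
--     pool_size = 0
--     if has_lower:
--         pool_size += 26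
--     if has_upper:
--         pool_size += 26
--     if has_digit:
--         pool_size += 10
--     if has_special:
--         pool_size += len(string.punctuation)
--     return has_lower, has_upper, has_digit, has_special, has_extended, pool_size
-- ===== Notes on version B (the rewrite author's own statement) =====
-- stated objective: alternative
-- what changed: Replaces A's five independent any() scans over the password with a single loop that maintains five boolean flags, then the same pool-size ladder.
import Mathlib
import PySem

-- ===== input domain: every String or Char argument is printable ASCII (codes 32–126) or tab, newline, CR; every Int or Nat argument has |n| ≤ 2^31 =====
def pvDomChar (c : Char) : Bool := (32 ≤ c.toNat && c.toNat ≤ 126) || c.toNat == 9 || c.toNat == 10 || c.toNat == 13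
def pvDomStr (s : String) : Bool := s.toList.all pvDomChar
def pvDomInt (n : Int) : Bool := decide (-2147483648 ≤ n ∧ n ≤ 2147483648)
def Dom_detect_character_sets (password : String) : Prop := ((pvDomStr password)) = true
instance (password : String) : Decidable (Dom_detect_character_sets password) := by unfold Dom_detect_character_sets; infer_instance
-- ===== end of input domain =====

-- B replaces A's five independent any() scans with one loop maintaining five flags (alternative decomposition, same cost).


-- ===== PORT A =====
def pvPunct : List Char := "!\"#$%&'()*+,-./:;<=>?@[\\]^_`{|}~".toList

def detect_character_sets (password : String) : Bool × Bool × Bool × Bool × Bool × Int :=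
  let has_lower := password.toList.any (fun c => PySem.Chars.islower c)
  let has_upper := password.toList.any (fun c => PySem.Chars.isupper c)
  let has_digit := password.toList.any (fun c => PySem.Chars.isdigit c)
  let has_special := password.toList.any (fun c => pvPunct.contains c)
  let has_extended := password.toList.any (fun c => decide (c.toNat > 127))
  let pool_size : Int :=
    (if has_lower then (26:Int) else 0) + (if has_upper then 26 else 0) +
    (if has_digit then 10 else 0) + (if has_special then (pvPunct.length : Int) else 0)
  (has_lower, has_upper, has_digit, has_special, has_extended, pool_size)

-- ===== PORT B =====
def pvStep (st : Bool × Bool × Bool × Bool × Bool) (c : Char) : Bool × Bool × Bool × Bool × Bool :=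
  ((if PySem.Chars.islower c then true else st.1),
   (if PySem.Chars.isupper c then true else st.2.1),
   (if PySem.Chars.isdigit c then true else st.2.2.1),
   (if pvPunct.contains c then true else st.2.2.2.1),
   (if decide (c.toNat > 127) then true else st.2.2.2.2))

def detect_character_sets_alt (password : String) : Bool × Bool × Bool × Bool × Bool × Int :=
  let flags := password.toList.foldl pvStep (false, false, false, false, false)
  let pool_size : Int :=
    (if flags.1 then (26:Int) else 0) + (if flags.2.1 then 26 else 0) +
    (if flags.2.2.1 then 10 else 0) + (if flags.2.2.2.1 then (pvPunct.length : Int) else 0)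
  (flags.1, flags.2.1, flags.2.2.1, flags.2.2.2.1, flags.2.2.2.2, pool_size)

-- ===== PRECONDITION & SPEC =====
def Spec_detect_character_sets (password : String) (out : Bool × Bool × Bool × Bool × Bool × Int) : Prop := out = detect_character_sets_alt password
instance (password : String) (out : Bool × Bool × Bool × Bool × Bool × Int) : Decidable (Spec_detect_character_sets password out) := by unfold Spec_detect_character_sets; infer_instance

-- ===== CLAIM (what is proved, stated in full; the proofs are below) =====
def Claim_equal_detect_character_sets : Prop := ∀ (password : String), Dom_detect_character_sets password → Spec_detect_character_sets password (detect_character_sets password)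

-- ===== LEMMAS AND PROOFS =====
theorem pvStep_foldl (l : List Char) (st : Bool × Bool × Bool × Bool × Bool) :
    l.foldl pvStep st =
      (st.1 || l.any (fun c => PySem.Chars.islower c),
       st.2.1 || l.any (fun c => PySem.Chars.isupper c),
       st.2.2.1 || l.any (fun c => PySem.Chars.isdigit c),
       st.2.2.2.1 || l.any (fun c => pvPunct.contains c),
       st.2.2.2.2 || l.any (fun c => decide (c.toNat > 127))) := by
  induction l generalizing st with
  | nil => simp
  | cons c t ih =>
    simp only [List.foldl_cons, List.any_cons, ih, pvStep]
    obtain ⟨a, b, d, e, f⟩ := st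
    by_cases h1 : PySem.Chars.islower c <;>
    by_cases h2 : PySem.Chars.isupper c <;>
    by_cases h3 : PySem.Chars.isdigit c <;>
    by_cases h4 : pvPunct.contains c <;>
    by_cases h5 : decide (c.toNat > 127) = true <;>
    simp [h1, h2, h3, h5, Bool.or_assoc, Bool.or_comm]

-- ===== VERDICT (by name: the statement is the Claim_ definition above) =====
theorem detect_character_sets_spec : Claim_equal_detect_character_sets := by
  intro password _
  unfold Spec_detect_character_sets detect_character_sets detect_character_sets_alt
  simp [pvStep_foldl]
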